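-- pv_equiv track=rewrite | github.com/Hinda02/DQ | validate_llm_fds.py | check_minimality
-- ===== SOURCE A (Python) =====
-- from collections import defaultdict
--
-- def validate_fd(rows, lhs_cols, rhs_col):
--     """
--     Check if FD holds in the data.
--     Returns (holds, violations)
--     """
--     # Map LHS values to RHS values
--     lhs_to_rhs = defaultdict(set)
--
--     for row in rows:
--         if len(row) <= max(lhs_cols + [rhs_col]):
--             continue  # Skip rows that don't have enough columns
--
--         # Extract LHS values
--         lhs_values = tuple(row[i] for i in lhs_cols)
--         rhs_value = row[rhs_col]
--
--         lhs_to_rhs[lhs_values].add(rhs_value)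
--
--     # Check for violations
--     violations = []
--     for lhs_val, rhs_vals in lhs_to_rhs.items():
--         if len(rhs_vals) > 1:
--             violations.append((lhs_val, rhs_vals))
--
--     holds = len(violations) == 0
--     return holds, violations
--
-- def check_minimality(rows, lhs_cols, rhs_col):
--     """
--     Check if FD is minimal (no redundant attributes on LHS).
--     Returns (is_minimal, redundant_attrs)
--     """
--     redundant = []
--
--     for i, col in enumerate(lhs_cols):
--         # Try removing this column from LHS
--         reduced_lhs = lhs_cols[:i] + lhs_cols[i+1:]
--         if len(reduced_lhs) == 0:
--             continue
--
--         # Check if reduced FD still holds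
--         holds, _ = validate_fd(rows, reduced_lhs, rhs_col)
--         if holds:
--             redundant.append(col + 1)  # Convert back to 1-based
--
--     is_minimal = len(redundant) == 0
--     return is_minimal, redundant
-- ===== SOURCE B (Python) =====
-- def check_minimality(rows, lhs_cols, rhs_col):
--     """
--     Check if FD is minimal (no redundant attributes on LHS).
--     Single pass over rows: per droppable column i keep a map
--     reduced-LHS-tuple -> first RHS value seen, plus a violation flag;
--     a column is redundant iff its flag never fires.
--     Returns (is_minimal, redundant_attrs)
--     """
--     n = len(lhs_cols)
--     if n <= 1:
--         return True, []
--     reduced = [lhs_cols[:i] + lhs_cols[i + 1:] for i in range(n)]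
--     first_seen = [dict() for _ in range(n)]
--     violated = [False] * n
--     for row in rows:
--         for i in range(n):
--             if violated[i]:
--                 continue  # column already known non-redundant
--             red = reduced[i]
--             if len(row) <= max(red + [rhs_col]):
--                 continue
--             key = tuple(row[c] for c in red)
--             v = row[rhs_col]
--             seen = first_seen[i].get(key)
--             if seen is None:
--                 first_seen[i][key] = v
--             elif seen != v:
--                 violated[i] = True
--     redundant = [lhs_cols[i] + 1 for i in range(n) if not violated[i]]
--     return len(redundant) == 0, redundant
-- ===== Notes on version B (the rewrite author's own statement) =====
-- stated objective: alternative
-- what changed: Single pass over the rows maintaining, per droppable LHS column, a hash map reduced-key -> first RHS value plus a violation flag (columns already violated are skipped), instead of A's per-column re-scan that groups all RHS values into sets and then scans for groups of size > 1.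
-- outside the precondition, e.g. on check_minimality([['a']], [-3, 0], 0): A raises IndexError, B raises IndexError
import Mathlib
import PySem

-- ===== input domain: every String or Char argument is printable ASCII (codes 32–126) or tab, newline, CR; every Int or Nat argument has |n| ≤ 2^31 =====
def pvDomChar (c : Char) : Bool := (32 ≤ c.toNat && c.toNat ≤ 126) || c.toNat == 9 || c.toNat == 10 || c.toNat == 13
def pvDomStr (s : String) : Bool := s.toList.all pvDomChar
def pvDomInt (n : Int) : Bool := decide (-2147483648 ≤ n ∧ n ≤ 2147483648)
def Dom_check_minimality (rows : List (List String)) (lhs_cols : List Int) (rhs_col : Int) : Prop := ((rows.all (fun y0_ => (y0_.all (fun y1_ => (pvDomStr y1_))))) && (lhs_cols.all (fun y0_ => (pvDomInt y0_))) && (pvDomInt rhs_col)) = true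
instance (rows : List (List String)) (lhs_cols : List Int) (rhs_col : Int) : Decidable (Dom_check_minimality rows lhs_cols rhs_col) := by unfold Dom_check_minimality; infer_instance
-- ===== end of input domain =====

-- B is an 'alternative' decomposition: one pass over the rows keeping, per droppable LHS column,
-- a map reduced-key -> first RHS value plus a violation flag (columns whose flag fired are skipped),
-- instead of A's per-column full grouping of RHS values into sets followed by a violation scan.

-- ===== PORT A =====
def validate_fd (rows : List (List String)) (lhs_cols : List Int) (rhs_col : Int) :
    Bool × List (List String × PySem.Set String) :=
  let d : PySem.Dict (List String) (PySem.Set String) :=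
    rows.foldl (fun d row =>
      if (row.length : Int) ≤ (PySem.List.max? (lhs_cols ++ [rhs_col]) (fun x => x)).getD 0 then d
      else
        let lhs_values := lhs_cols.map (fun i => PySem.List.pyGetD row i "")
        let rhs_value := PySem.List.pyGetD row rhs_col ""
        d.modify lhs_values PySem.Set.empty (fun s => PySem.Set.add s rhs_value))
      PySem.Dict.empty
  let violations := d.items.foldl (fun vs p => if 1 < p.2.length then vs ++ [p] else vs) []
  ((violations.length == 0 : Bool), violations)

def check_minimality (rows : List (List String)) (lhs_cols : List Int) (rhs_col : Int) : Bool × List Int :=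
  let redundant := (PySem.List.enumerate lhs_cols).foldl (fun red p =>
      let reduced := PySem.List.slice lhs_cols none (some p.1) ++
                     PySem.List.slice lhs_cols (some (p.1 + 1)) none
      if reduced.length = 0 then red
      else if (validate_fd rows reduced rhs_col).1 then red ++ [p.2 + 1] else red) []
  ((redundant.length == 0 : Bool), redundant)

-- ===== PORT B =====
def stepB (rhs_col : Int) (row : List String)
    (st : PySem.Dict (List String) String × Bool) (red : List Int) :
    PySem.Dict (List String) String × Bool :=
  if st.2 then st
  else if (row.length : Int) ≤ (PySem.List.max? (red ++ [rhs_col]) (fun x => x)).getD 0 then st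
  else
    let key := red.map (fun c => PySem.List.pyGetD row c "")
    let v := PySem.List.pyGetD row rhs_col ""
    match st.1.get? key with
    | none => (st.1.insert key v, st.2)
    | some seen => if seen ≠ v then (st.1, true) else st

def check_minimality_alt (rows : List (List String)) (lhs_cols : List Int) (rhs_col : Int) : Bool × List Int :=
  if lhs_cols.length ≤ 1 then (true, [])
  else
    let reduced := (List.range lhs_cols.length).map (fun i => lhs_cols.take i ++ lhs_cols.drop (i + 1))
    let final := rows.foldl
        (fun sts row => (sts.zip reduced).map (fun q => stepB rhs_col row q.1 q.2))
        (reduced.map (fun _ => (PySem.Dict.empty, false)))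
    let redundant := ((lhs_cols.zip final).filter (fun q => !q.2.2)).map (fun q => q.1 + 1)
    ((redundant.length == 0 : Bool), redundant)

-- ===== PRECONDITION & SPEC =====
-- Pre_ excludes exactly the inputs where Python A raises IndexError: some row that passes the
-- length filter for some reduced LHS has an index (a reduced column or rhs_col) outside Python's
-- valid range -len(row) ≤ c < len(row).
def Pre_check_minimality (rows : List (List String)) (lhs_cols : List Int) (rhs_col : Int) : Prop :=
  2 ≤ lhs_cols.length →
    ∀ i < lhs_cols.length, ∀ row ∈ rows,
      (PySem.List.max? ((lhs_cols.take i ++ lhs_cols.drop (i + 1)) ++ [rhs_col]) (fun x => x)).getD 0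
          < (row.length : Int) →
        ∀ c ∈ (lhs_cols.take i ++ lhs_cols.drop (i + 1)) ++ [rhs_col],
          -(row.length : Int) ≤ c ∧ c < (row.length : Int)

instance (rows : List (List String)) (lhs_cols : List Int) (rhs_col : Int) : Decidable (Pre_check_minimality rows lhs_cols rhs_col) := by unfold Pre_check_minimality; infer_instance

def pvWitness_check_minimality : List (List String) × List Int × Int :=
  ([["a", "b", "c"], ["a", "b", "d"]], [0, 1], 2)

def Spec_check_minimality (rows : List (List String)) (lhs_cols : List Int) (rhs_col : Int) (out : Bool × List Int) : Prop := out = check_minimality_alt rows lhs_cols rhs_col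
instance (rows : List (List String)) (lhs_cols : List Int) (rhs_col : Int) (out : Bool × List Int) : Decidable (Spec_check_minimality rows lhs_cols rhs_col out) := by unfold Spec_check_minimality; infer_instance

-- ===== CLAIM (what is proved, stated in full; the proofs are below) =====
def Claim_equal_check_minimality : Prop := ∀ (rows : List (List String)) (lhs_cols : List Int) (rhs_col : Int), Dom_check_minimality rows lhs_cols rhs_col → Pre_check_minimality rows lhs_cols rhs_col → Spec_check_minimality rows lhs_cols rhs_col (check_minimality rows lhs_cols rhs_col)

-- ===== LEMMAS AND PROOFS =====

-- A's per-row dict update, named for the proofs (definitionally the fold body of validate_fd)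
def aStep (red : List Int) (rhs_col : Int) (d : PySem.Dict (List String) (PySem.Set String))
    (row : List String) : PySem.Dict (List String) (PySem.Set String) :=
  if (row.length : Int) ≤ (PySem.List.max? (red ++ [rhs_col]) (fun x => x)).getD 0 then d
  else d.modify (red.map (fun i => PySem.List.pyGetD row i "")) PySem.Set.empty
        (fun s => PySem.Set.add s (PySem.List.pyGetD row rhs_col ""))

-- the simulation invariant between A's dict of RHS-value sets and B's (first value, flag) state
def simInv (d : PySem.Dict (List String) (PySem.Set String))
    (st : PySem.Dict (List String) String × Bool) : Prop :=
  (st.2 = false → ∀ k, st.1.get? k = (d.get? k).map List.headI) ∧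
  (st.2 = true ↔ ∃ k s, d.get? k = some s ∧ 1 < s.length) ∧
  (∀ k s, d.get? k = some s → s ≠ []) ∧
  d.keys.Nodup

theorem add_ne_nil (s : PySem.Set String) (v : String) : PySem.Set.add s v ≠ [] := by
  rw [PySem.Set.add_eq_ite]
  split_ifs with h
  · exact List.ne_nil_of_mem h
  · simp

theorem length_le_add (s : PySem.Set String) (v : String) :
    s.length ≤ (PySem.Set.add s v).length := by
  rw [PySem.Set.add_eq_ite]; split_ifs <;> simp

-- after A's update at key k0, any existing violating set is still violating

theorem exists_mono (d : PySem.Dict (List String) (PySem.Set String)) (k0 : List String)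
    (v : String) (h : ∃ k s, d.get? k = some s ∧ 1 < s.length) :
    ∃ k s, (d.insert k0 (PySem.Set.add (d.getD k0 PySem.Set.empty) v)).get? k = some s ∧
      1 < s.length := by
  obtain ⟨k, s, hk, hs⟩ := h
  by_cases hkk : k = k0
  · subst hkk
    refine ⟨k, _, PySem.Dict.get?_insert_self _ _ _, ?_⟩
    rw [PySem.Dict.getD_of_get?_eq_some _ _ hk]
    exact lt_of_lt_of_le hs (length_le_add s v)
  · exact ⟨k, s, by rw [PySem.Dict.get?_insert_of_ne _ _ hkk]; exact hk, hs⟩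

theorem inv_step (red : List Int) (rhs_col : Int) (row : List String)
    (d : PySem.Dict (List String) (PySem.Set String))
    (st : PySem.Dict (List String) String × Bool) (h : simInv d st) :
    simInv (aStep red rhs_col d row) (stepB rhs_col row st red) := by
  obtain ⟨h1, h2, h3, h4⟩ := h
  unfold aStep stepB
  by_cases hlen : (row.length : Int) ≤ (PySem.List.max? (red ++ [rhs_col]) (fun x => x)).getD 0
  · -- short row: A unchanged; B unchanged whatever the flag
    simp only [hlen, if_true]
    by_cases hb : st.2 <;> simp [hb] <;> exact ⟨h1, h2, h3, h4⟩
  · simp only [hlen, if_false]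
    set k0 := red.map (fun i => PySem.List.pyGetD row i "") with hk0def
    set v := PySem.List.pyGetD row rhs_col "" with hvdef
    have hmod : d.modify k0 PySem.Set.empty (fun s => PySem.Set.add s v) =
        d.insert k0 (PySem.Set.add (d.getD k0 PySem.Set.empty) v) := rfl
    have hnodup' : (d.insert k0 (PySem.Set.add (d.getD k0 PySem.Set.empty) v)).keys.Nodup :=
      PySem.Dict.nodup_keys_insert _ _ _ h4
    have hne' : ∀ k s, (d.insert k0 (PySem.Set.add (d.getD k0 PySem.Set.empty) v)).get? k =
        some s → s ≠ [] := by
      intro k s hk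
      by_cases hkk : k = k0
      · subst hkk; rw [PySem.Dict.get?_insert_self] at hk
        cases hk; exact add_ne_nil _ _
      · rw [PySem.Dict.get?_insert_of_ne _ _ hkk] at hk; exact h3 k s hk
    by_cases hb : st.2
    · -- flag already set: B skips, A updates
      simp only [hb, if_true, hmod]
      refine ⟨(by intro hf; rw [hb] at hf; cases hf), ?_, hne', hnodup'⟩
      constructor
      · intro _; exact exists_mono d k0 v (h2.mp hb)
      · intro _; exact hb
    · have hbf : st.2 = false := by simpa using hb
      have hnov : ¬ ∃ k s, d.get? k = some s ∧ 1 < s.length := by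
        rw [← h2]; simp [hbf]
      simp only [hbf, Bool.false_eq_true, if_false, hmod]
      have hm := h1 hbf
      cases hd0 : d.get? k0 with
      | none =>
        have : st.1.get? k0 = none := by rw [hm k0, hd0]; rfl
        simp only [this]
        have hval : PySem.Set.add (d.getD k0 PySem.Set.empty) v = [v] := by
          rw [PySem.Dict.getD_of_get?_eq_none _ _ hd0]
          rfl
        refine ⟨?_, ?_, hne', hnodup'⟩
        · intro _ k
          by_cases hkk : k = k0
          · subst hkk
            rw [PySem.Dict.get?_insert_self, PySem.Dict.get?_insert_self, hval]
            rfl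
          · rw [PySem.Dict.get?_insert_of_ne _ _ hkk, PySem.Dict.get?_insert_of_ne _ _ hkk]
            exact hm k
        · simp only [Bool.false_eq_true, false_iff]
          intro ⟨k, s, hk, hs⟩
          by_cases hkk : k = k0
          · subst hkk; rw [PySem.Dict.get?_insert_self, hval] at hk
            cases hk; simp at hs
          · rw [PySem.Dict.get?_insert_of_ne _ _ hkk] at hk
            exact hnov ⟨k, s, hk, hs⟩
      | some s =>
        have hsne : s ≠ [] := h3 k0 s hd0
        have hgd : d.getD k0 PySem.Set.empty = s := PySem.Dict.getD_of_get?_eq_some _ _ hd0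
        have hseen : st.1.get? k0 = some s.headI := by rw [hm k0, hd0]; rfl
        simp only [hseen]
        have hheadmem : s.headI ∈ s := by
          cases s with
          | nil => exact absurd rfl hsne
          | cons a t => exact List.mem_cons_self ..
        by_cases hvv : s.headI = v
        · -- same value: A's set unchanged, B unchanged
          simp only [hvv, ne_eq, not_true_eq_false, if_false]
          have hadd : PySem.Set.add s v = s := PySem.Set.add_of_mem (hvv ▸ hheadmem)
          have hget' : ∀ k, (d.insert k0 (PySem.Set.add (d.getD k0 PySem.Set.empty) v)).get? k =
              d.get? k := by
            intro k
            by_cases hkk : k = k0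
            · subst hkk; rw [PySem.Dict.get?_insert_self, hgd, hadd, hd0]
            · rw [PySem.Dict.get?_insert_of_ne _ _ hkk]
          refine ⟨?_, ?_, hne', hnodup'⟩
          · intro hf k; rw [hget' k]; exact hm k
          · simp only [hbf, Bool.false_eq_true, false_iff]
            intro ⟨k, s', hk, hs'⟩
            rw [hget' k] at hk
            exact hnov ⟨k, s', hk, hs'⟩
        · -- differing value: B raises its flag; A's set at k0 now has > 1 element
          simp only [ne_eq, hvv, not_false_eq_true, if_true]
          have hlt : 1 < (PySem.Set.add s v).length := by
            rw [PySem.Set.add_eq_ite]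
            split_ifs with hmem
            · -- v already in s, and headI ∈ s with headI ≠ v: two distinct elements
              cases s with
              | nil => exact absurd rfl hsne
              | cons a t =>
                cases t with
                | nil =>
                  simp only [List.mem_singleton] at hmem
                  simp only [List.headI] at hvv
                  exact absurd hmem.symm (by simpa using hvv)
                | cons b u => simp
            · have : 1 ≤ s.length := List.length_pos_of_ne_nil hsne
              simp [List.length_append]; omega
          refine ⟨(by intro hf; cases hf), ?_, hne', hnodup'⟩
          constructor
          · intro _
            exact ⟨k0, _, PySem.Dict.get?_insert_self _ _ _, by rw [hgd]; exact hlt⟩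
          · intro _; rfl

theorem inv_fold (red : List Int) (rhs_col : Int) (rows : List (List String)) :
    ∀ d st, simInv d st →
      simInv (rows.foldl (aStep red rhs_col) d)
        (rows.foldl (fun st row => stepB rhs_col row st red) st) := by
  induction rows with
  | nil => intro d st h; exact h
  | cons row rows ih => intro d st h; exact ih _ _ (inv_step red rhs_col row d st h)

theorem simInv_init : simInv PySem.Dict.empty (PySem.Dict.empty, false) := by
  refine ⟨?_, ?_, ?_, PySem.Dict.nodup_keys_empty⟩
  · intro _ k; rw [PySem.Dict.get?_empty, PySem.Dict.get?_empty]; rfl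
  · constructor
    · intro h; cases h
    · rintro ⟨k, s, hk, _⟩; rw [PySem.Dict.get?_empty] at hk; cases hk
  · intro k s hk; rw [PySem.Dict.get?_empty] at hk; cases hk

theorem holds_eq (rows : List (List String)) (red : List Int) (rhs_col : Int) :
    (validate_fd rows red rhs_col).1 =
      !(rows.foldl (fun st row => stepB rhs_col row st red) (PySem.Dict.empty, false)).2 := by
  obtain ⟨h1, h2, h3, h4⟩ := inv_fold red rhs_col rows PySem.Dict.empty
    (PySem.Dict.empty, false) simInv_init
  have hval : (validate_fd rows red rhs_col).1 =
      ((((rows.foldl (aStep red rhs_col) PySem.Dict.empty).items.foldl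
          (fun vs p => if 1 < p.2.length then vs ++ [p] else vs) []).length == 0) : Bool) := rfl
  rw [hval]
  set d := rows.foldl (aStep red rhs_col) PySem.Dict.empty with hd
  set stf := rows.foldl (fun st row => stepB rhs_col row st red) (PySem.Dict.empty, false) with hstf
  have hfilter : d.items.foldl (fun vs p => if 1 < p.2.length then vs ++ [p] else vs) [] =
      d.items.filter (fun p => decide (1 < p.2.length)) := by
    have hcong := PySem.List.foldl_congr_mem d.items
      (fun vs p => if 1 < p.2.length then vs ++ [p] else vs)
      (fun vs p => if (fun q : List String × PySem.Set String =>
          decide (1 < q.2.length)) p = true then vs ++ [id p] else vs)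
      [] (by intro acc x _; simp)
    rw [hcong, PySem.List.foldl_append_if]
    simp
  rw [hfilter]
  cases hst : stf.2 with
  | true =>
    obtain ⟨k, s, hk, hs⟩ := h2.mp hst
    have hmem : (k, s) ∈ d.items.filter (fun p => decide (1 < p.2.length)) :=
      List.mem_filter.mpr ⟨PySem.Dict.mem_items_of_get?_eq_some _ hk, by simpa using hs⟩
    have : d.items.filter (fun p => decide (1 < p.2.length)) ≠ [] := List.ne_nil_of_mem hmem
    simp [List.length_eq_zero_iff, this]
  | false =>
    have : d.items.filter (fun p => decide (1 < p.2.length)) = [] := by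
      rw [List.filter_eq_nil_iff]
      rintro ⟨k, s⟩ hmem hdec
      have hk := PySem.Dict.get?_of_mem_items _ hmem h4
      have : stf.2 = true := h2.mpr ⟨k, s, hk, by simpa using hdec⟩
      rw [hst] at this; cases this
    simp [this]

theorem enumerate_eq (xs : List Int) : ∀ s : Int,
    PySem.List.enumerate xs s =
      (List.range xs.length).map (fun i : Nat => (s + (i : Int), xs.getD i 0)) := by
  induction xs with
  | nil => intro s; rfl
  | cons x t ih =>
    intro s
    simp only [PySem.List.enumerate, List.length_cons, List.range_succ_eq_map, List.map_cons,
      List.map_map, ih (s + 1)]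
    simp only [List.cons.injEq]
    refine ⟨by simp, ?_⟩
    apply List.map_congr_left
    intro i _
    simp only [Function.comp, Nat.succ_eq_add_one, List.getD_cons_succ]
    congr 1
    push_cast; ring

theorem zip_range_map {β : Type} (xs : List Int) (h : Nat → β) :
    xs.zip ((List.range xs.length).map h) =
      (List.range xs.length).map (fun i => (xs.getD i 0, h i)) := by
  induction xs generalizing h with
  | nil => rfl
  | cons x t ih =>
    simp only [List.length_cons, List.range_succ_eq_map, List.map_cons, List.map_map,
      List.zip_cons_cons]
    simp only [List.cons.injEq]
    refine ⟨rfl, ?_⟩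
    rw [ih (h ∘ Nat.succ)]
    apply List.map_congr_left
    intro i _
    rfl

theorem foldl_zip_map (rhs_col : Int) (cfgs : List (List Int)) (rows : List (List String)) :
    ∀ g : List Int → PySem.Dict (List String) String × Bool,
      rows.foldl (fun sts row => (sts.zip cfgs).map (fun q => stepB rhs_col row q.1 q.2)) (cfgs.map g)
        = cfgs.map (fun red => rows.foldl (fun st row => stepB rhs_col row st red) (g red)) := by
  induction rows with
  | nil => intro g; rfl
  | cons row rows ih =>
    intro g
    simp only [List.foldl_cons]
    have hz : (cfgs.map g).zip cfgs = cfgs.map (fun red => (g red, red)) := by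
      simpa using (List.zip_map' (f := g) (g := id) (l := cfgs))
    rw [hz, List.map_map]
    exact ih (fun red => stepB rhs_col row (g red) red)

theorem check_minimality_small (rows : List (List String)) (lhs_cols : List Int) (rhs_col : Int)
    (h : lhs_cols.length ≤ 1) :
    check_minimality rows lhs_cols rhs_col = (true, []) := by
  match lhs_cols, h with
  | [], _ => rfl
  | [x], _ => rfl

theorem altB_shape (rows : List (List String)) (lhs_cols : List Int) (rhs_col : Int)
    (h : ¬ lhs_cols.length ≤ 1) :
    check_minimality_alt rows lhs_cols rhs_col =
      ((((List.range lhs_cols.length).filter (fun i =>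
            !(rows.foldl (fun st row => stepB rhs_col row st
                (lhs_cols.take i ++ lhs_cols.drop (i + 1))) (PySem.Dict.empty, false)).2)).map
          (fun i => lhs_cols.getD i 0 + 1)).length == 0,
        ((List.range lhs_cols.length).filter (fun i =>
            !(rows.foldl (fun st row => stepB rhs_col row st
                (lhs_cols.take i ++ lhs_cols.drop (i + 1))) (PySem.Dict.empty, false)).2)).map
          (fun i => lhs_cols.getD i 0 + 1)) := by
  rw [check_minimality_alt, if_neg h]
  simp only []
  rw [foldl_zip_map rhs_col
      ((List.range lhs_cols.length).map (fun i => lhs_cols.take i ++ lhs_cols.drop (i + 1)))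
      rows (fun _ => (PySem.Dict.empty, false)), List.map_map]
  simp only [Function.comp_def]
  rw [zip_range_map lhs_cols (fun i =>
      rows.foldl (fun st row => stepB rhs_col row st
        (lhs_cols.take i ++ lhs_cols.drop (i + 1))) (PySem.Dict.empty, false)),
    List.filter_map, List.map_map]
  simp only [Function.comp_def]

theorem aA_shape (rows : List (List String)) (lhs_cols : List Int) (rhs_col : Int)
    (h : ¬ lhs_cols.length ≤ 1) :
    check_minimality rows lhs_cols rhs_col =
      ((((List.range lhs_cols.length).filter (fun i =>
            !(rows.foldl (fun st row => stepB rhs_col row st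
                (lhs_cols.take i ++ lhs_cols.drop (i + 1))) (PySem.Dict.empty, false)).2)).map
          (fun i => lhs_cols.getD i 0 + 1)).length == 0,
        ((List.range lhs_cols.length).filter (fun i =>
            !(rows.foldl (fun st row => stepB rhs_col row st
                (lhs_cols.take i ++ lhs_cols.drop (i + 1))) (PySem.Dict.empty, false)).2)).map
          (fun i => lhs_cols.getD i 0 + 1)) := by
  rw [check_minimality, enumerate_eq lhs_cols 0, List.foldl_map]
  have hbody : ∀ (acc : List Int), ∀ i ∈ List.range lhs_cols.length,
      (fun (red : List Int) (p : Int × Int) =>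
        let reduced := PySem.List.slice lhs_cols none (some p.1) ++
                       PySem.List.slice lhs_cols (some (p.1 + 1)) none
        if reduced.length = 0 then red
        else if (validate_fd rows reduced rhs_col).1 then red ++ [p.2 + 1] else red)
        acc ((fun i : Nat => ((0 : Int) + (i : Int), lhs_cols.getD i 0)) i)
      = if (!(rows.foldl (fun st row => stepB rhs_col row st
            (lhs_cols.take i ++ lhs_cols.drop (i + 1))) (PySem.Dict.empty, false)).2) = true
          then acc ++ [(fun j : Nat => lhs_cols.getD j 0 + 1) i] else acc := by
    intro acc i hi
    rw [List.mem_range] at hi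
    have hsl1 : PySem.List.slice lhs_cols none (some ((0 : Int) + i)) = lhs_cols.take i := by
      rw [show ((0 : Int) + i) = (i : Int) by ring, PySem.List.slice_to lhs_cols (by positivity)]
      simp
    have hsl2 : PySem.List.slice lhs_cols (some ((0 : Int) + i + 1)) none =
        lhs_cols.drop (i + 1) := by
      rw [show ((0 : Int) + i + 1) = ((i + 1 : Nat) : Int) by push_cast; ring,
        PySem.List.slice_from lhs_cols (by positivity)]
      simp
    simp only [hsl1, hsl2]
    have hlen : ¬ (lhs_cols.take i ++ lhs_cols.drop (i + 1)).length = 0 := by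
      simp only [List.length_append, List.length_take, List.length_drop]
      omega
    rw [if_neg hlen, holds_eq rows (lhs_cols.take i ++ lhs_cols.drop (i + 1)) rhs_col]
  rw [PySem.List.foldl_congr_mem _ _ _ [] hbody, PySem.List.foldl_append_if]
  simp

theorem check_minimality_eq (rows : List (List String)) (lhs_cols : List Int) (rhs_col : Int) :
    check_minimality rows lhs_cols rhs_col = check_minimality_alt rows lhs_cols rhs_col := by
  by_cases hle : lhs_cols.length ≤ 1
  · rw [check_minimality_small rows lhs_cols rhs_col hle, check_minimality_alt, if_pos hle]
  · rw [aA_shape rows lhs_cols rhs_col hle, altB_shape rows lhs_cols rhs_col hle]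

-- ===== VERDICT (by name: the statement is the Claim_ definition above) =====
theorem check_minimality_spec : Claim_equal_check_minimality := by
  intro rows lhs_cols rhs_col _ _
  exact check_minimality_eq rows lhs_cols rhs_col
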